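-- pv_equiv track=rewrite | github.com/Wewoll/TIC | TP2/TP2_Funciones.py | genMatrizOcurrencias
-- ===== SOURCE A (Python) =====
-- def genAlfabeto(cadena):
--     alfabeto = []
--     for simbolo in cadena:
--         if simbolo not in alfabeto:
--             alfabeto.append(simbolo)
--
--     return alfabeto
--
-- def genMatrizOcurrencias(cadena):
--     alfabeto = genAlfabeto(cadena)
--     N = len(alfabeto)
--     matriz_ocurrencias = [[0 for _ in range(N)] for _ in range(N)]
--
--     for i in range(len(cadena) - 1):
--         origen = alfabeto.index(cadena[i])
--         destino = alfabeto.index(cadena[i + 1])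
--         matriz_ocurrencias[origen][destino] += 1
--
--     return matriz_ocurrencias
-- ===== SOURCE B (Python) =====
-- def genMatrizOcurrencias(cadena):
--     alfabeto = list(dict.fromkeys(cadena))
--     pares = list(zip(cadena, cadena[1:]))
--     return [[pares.count((a, b)) for b in alfabeto] for a in alfabeto]
-- ===== Notes on version B (the rewrite author's own statement) =====
-- stated objective: simpler
-- what changed: B never mutates a matrix: it builds the first-appearance alphabet with dict.fromkeys and computes each matrix entry directly as the count of that symbol pair among the adjacent pairs, instead of A's per-pair in-place increments driven by alfabeto.index lookups.
import Mathlib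
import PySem

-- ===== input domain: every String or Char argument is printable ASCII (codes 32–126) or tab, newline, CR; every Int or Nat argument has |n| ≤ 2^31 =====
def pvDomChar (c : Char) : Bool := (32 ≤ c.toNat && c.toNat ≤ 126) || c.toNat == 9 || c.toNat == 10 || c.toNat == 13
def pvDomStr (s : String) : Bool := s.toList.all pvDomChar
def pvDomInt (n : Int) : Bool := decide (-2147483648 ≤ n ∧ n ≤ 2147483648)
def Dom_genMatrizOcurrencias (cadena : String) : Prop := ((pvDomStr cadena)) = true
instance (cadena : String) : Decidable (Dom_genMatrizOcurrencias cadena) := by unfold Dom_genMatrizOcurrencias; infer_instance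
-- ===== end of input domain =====

-- B never mutates a matrix: it computes each entry directly as the count of that symbol pair
-- among the adjacent pairs of the string (a per-entry counting decomposition instead of A's
-- per-pair in-place increments with alfabeto.index lookups).

-- ===== PORT A =====
def genAlfabeto (cadena : List Char) : List Char :=
  cadena.foldl (fun alfabeto simbolo =>
    if alfabeto.contains simbolo then alfabeto else alfabeto ++ [simbolo]) []

-- `alfabeto.index(x)` never raises here (x always occurs); List.idxOf is exact in that case.
-- cadena[i] with 0 ≤ i < len: getD is exact.
def genMatrizOcurrencias (cadena : String) : List (List Int) :=
  let cs := cadena.toList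
  let alfabeto := genAlfabeto cs
  let N := alfabeto.length
  let matriz := List.replicate N (List.replicate N (0 : Int))
  (List.range (cs.length - 1)).foldl (fun m i =>
    let origen := List.idxOf (cs.getD i ' ') alfabeto
    let destino := List.idxOf (cs.getD (i + 1) ' ') alfabeto
    m.modify origen (fun fila => fila.modify destino (· + 1))) matriz

-- ===== PORT B =====
-- list(dict.fromkeys(cadena)) = first-appearance distinct symbols = PySem.List.dedup;
-- zip(cadena, cadena[1:]) = cs.zip cs.tail; pares.count = PySem.List.count (exact).
def genMatrizOcurrencias_alt (cadena : String) : List (List Int) :=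
  let cs := cadena.toList
  let alfabeto := PySem.List.dedup cs
  let pares := cs.zip cs.tail
  alfabeto.map (fun a => alfabeto.map (fun b => (PySem.List.count pares (a, b) : Int)))

-- ===== PRECONDITION & SPEC =====
def Spec_genMatrizOcurrencias (cadena : String) (out : List (List Int)) : Prop := out = genMatrizOcurrencias_alt cadena
instance (cadena : String) (out : List (List Int)) : Decidable (Spec_genMatrizOcurrencias cadena out) := by unfold Spec_genMatrizOcurrencias; infer_instance

-- ===== CLAIM (what is proved, stated in full; the proofs are below) =====
def Claim_equal_genMatrizOcurrencias : Prop := ∀ (cadena : String), Dom_genMatrizOcurrencias cadena → Spec_genMatrizOcurrencias cadena (genMatrizOcurrencias cadena)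

-- ===== LEMMAS AND PROOFS =====

-- A's alphabet loop is exactly set-of-list (first appearances in order).
theorem genAlfabeto_eq_ofList (cs : List Char) : genAlfabeto cs = PySem.Set.ofList cs := by
  rw [PySem.Set.ofList_eq_foldl]; rfl

-- the (i, i+1) index loop reads exactly the adjacent pairs
theorem range_pairs (cs : List Char) :
    (List.range (cs.length - 1)).map (fun i => (cs.getD i ' ', cs.getD (i + 1) ' '))
      = cs.zip cs.tail := by
  apply List.ext_getElem
  · simp [List.length_zip]
  · intro i h1 h2
    simp only [List.getElem_map, List.getElem_range, List.getElem_zip, List.getElem_tail]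
    have hlen : i + 1 < cs.length := by
      simp at h1; omega
    rw [List.getD_eq_getElem _ _ (by omega), List.getD_eq_getElem _ _ hlen]

-- one in-place increment, seen entrywise
theorem getD_modify_entry (m : List (List Int)) (F : Int → Int) (a b r c : Nat)
    (hb : b < (m.getD a []).length) :
    ((m.modify a (fun fila => fila.modify b F)).getD r []).getD c 0
      = if a = r ∧ b = c then F ((m.getD r []).getD c 0) else (m.getD r []).getD c 0 := by
  have ha : a < m.length := by
    by_contra h
    push Not at h
    rw [List.getD_eq_getElem?_getD, List.getElem?_eq_none (by omega)] at hb
    simp at hb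
  simp only [List.getD_eq_getElem?_getD, List.getElem?_modify]
  by_cases har : a = r
  · subst har
    rw [List.getElem?_eq_getElem ha]
    simp only [Option.map_eq_map, Option.map_some, if_true, true_and, Option.getD_some]
    rw [List.getElem?_modify]
    by_cases hbc : b = c
    · subst hbc
      have hb' : b < m[a].length := by
        rw [List.getD_eq_getElem?_getD, List.getElem?_eq_getElem ha] at hb
        simpa using hb
      rw [List.getElem?_eq_getElem hb']
      simp
    · simp [hbc]
  · have : ((fun x => if a = r then x.modify b F else x) <$> m[r]?) = m[r]? := by
      cases m[r]? <;> simp [har]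
    rw [this]
    simp [har]

def GoodM (N : Nat) (m : List (List Int)) : Prop :=
  m.length = N ∧ ∀ fila ∈ m, fila.length = N

theorem goodM_modify {N : Nat} {m : List (List Int)} (h : GoodM N m) (a : Nat)
    (ha : a < m.length)
    (F : List Int → List Int) (hF : ∀ fila, (F fila).length = fila.length) :
    GoodM N (m.modify a F) := by
  constructor
  · simp [List.length_modify, h.1]
  · intro fila hmem
    rw [List.modify_eq_set] at hmem
    rcases List.mem_or_eq_of_mem_set hmem with h' | h'
    · exact h.2 _ h'
    · subst h'
      rw [hF]
      rw [List.getElem?_eq_getElem ha]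
      exact h.2 _ (List.getElem_mem ha)

-- A's counting loop, entrywise
theorem A_fold_entry (f g : Char × Char → Nat) {N : Nat} (ps : List (Char × Char)) :
    ∀ (m : List (List Int)), GoodM N m → (∀ p ∈ ps, f p < N) → (∀ p ∈ ps, g p < N) →
    ∀ (r c : Nat),
    ((ps.foldl (fun m p => m.modify (f p) (fun fila => fila.modify (g p) (· + 1))) m).getD r []).getD c 0
      = (m.getD r []).getD c 0 + (ps.countP (fun p => f p == r && g p == c) : Int) := by
  induction ps with
  | nil => intro m _ _ _ r c; simp
  | cons p t ih =>
    intro m hm hf hg r c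
    simp only [List.foldl_cons]
    have hfp : f p < N := hf p (by simp)
    have hgp : g p < N := hg p (by simp)
    have hflen : f p < m.length := hm.1 ▸ hfp
    have hrow : m[f p].length = N := hm.2 _ (List.getElem_mem hflen)
    have hbl : g p < (m.getD (f p) []).length := by
      rw [List.getD_eq_getElem?_getD, List.getElem?_eq_getElem hflen]
      simpa [hrow] using hgp
    have hgood' : GoodM N (m.modify (f p) (fun fila => fila.modify (g p) (· + 1))) :=
      goodM_modify hm _ hflen _ (fun fila => List.length_modify _ _ _)
    rw [ih _ hgood' (fun q hq => hf q (by simp [hq])) (fun q hq => hg q (by simp [hq])) r c]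
    rw [getD_modify_entry m _ _ _ _ _ hbl]
    rw [List.countP_cons]
    by_cases hcase : f p = r ∧ g p = c
    · have : (f p == r && g p == c) = true := by simp [hcase.1, hcase.2]
      simp [hcase]
      ring
    · have : (f p == r && g p == c) = false := by
        simp only [Bool.and_eq_false_iff, beq_eq_false_iff_ne]
        by_cases h1 : f p = r
        · exact Or.inr (fun h2 => hcase ⟨h1, h2⟩)
        · exact Or.inl h1
      simp [hcase, this]

theorem idxOf_eq_iff {l : List Char} (hnd : l.Nodup) {x : Char} (hx : x ∈ l)
    {r : Nat} (hr : r < l.length) : List.idxOf x l = r ↔ x = l[r] := by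
  constructor
  · intro h
    subst h
    exact (List.getElem_idxOf (List.idxOf_lt_length_of_mem hx)).symm
  · intro h
    subst h
    exact hnd.idxOf_getElem r hr

theorem goodM_foldl {β : Type} {N : Nat} (l : List β) (a : β → Nat) (F : β → List Int → List Int)
    (hF : ∀ x fila, (F x fila).length = fila.length) :
    ∀ (m : List (List Int)), GoodM N m → (∀ x ∈ l, a x < N) →
    GoodM N (l.foldl (fun m x => m.modify (a x) (F x)) m) := by
  induction l with
  | nil => intro m hm _; exact hm
  | cons x t ih =>
    intro m hm ha
    simp only [List.foldl_cons]
    exact ih _ (goodM_modify hm _ (hm.1 ▸ ha x (by simp)) _ (hF x))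
      (fun y hy => ha y (by simp [hy]))

theorem main_eq (cadena : String) :
    genMatrizOcurrencias cadena = genMatrizOcurrencias_alt cadena := by
  unfold genMatrizOcurrencias genMatrizOcurrencias_alt
  simp only [genAlfabeto_eq_ofList, PySem.List.dedup_eq_ofList, PySem.List.count_eq]
  set cs := cadena.toList with hcs
  set alf := PySem.Set.ofList cs with half
  set ps := cs.zip cs.tail with hps
  set N := alf.length with hN
  have hndalf : alf.Nodup := PySem.Set.nodup_ofList cs
  have hmem : ∀ p ∈ ps, p.1 ∈ cs ∧ p.2 ∈ cs := by
    rintro ⟨x, y⟩ hp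
    have := List.of_mem_zip hp
    exact ⟨this.1, List.tail_subset cs this.2⟩
  have hmalf : ∀ x ∈ cs, x ∈ alf := fun x hx => (PySem.Set.mem_ofList cs x).mpr hx
  set f : Char × Char → Nat := fun k => List.idxOf k.1 alf with hf
  set g : Char × Char → Nat := fun k => List.idxOf k.2 alf with hg
  have hfN : ∀ p ∈ ps, f p < N := fun p hp =>
    List.idxOf_lt_length_of_mem (hmalf _ (hmem p hp).1)
  have hgN : ∀ p ∈ ps, g p < N := fun p hp =>
    List.idxOf_lt_length_of_mem (hmalf _ (hmem p hp).2)
  have hAeq : (List.range (cs.length - 1)).foldl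
      (fun m i => m.modify (List.idxOf (cs.getD i ' ') alf)
        (fun fila => fila.modify (List.idxOf (cs.getD (i + 1) ' ') alf) (· + 1)))
      (List.replicate N (List.replicate N (0 : Int)))
      = ps.foldl (fun m p => m.modify (f p) (fun fila => fila.modify (g p) (· + 1)))
        (List.replicate N (List.replicate N (0 : Int))) := by
    rw [hps, ← range_pairs cs, List.foldl_map]
  rw [hAeq]
  have hza : GoodM N (List.replicate N (List.replicate N (0 : Int))) := by
    constructor
    · simp
    · intro fila hf
      rw [List.eq_of_mem_replicate hf]
      simp
  have hAg : GoodM N (ps.foldl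
      (fun m p => m.modify (f p) (fun fila => fila.modify (g p) (· + 1)))
      (List.replicate N (List.replicate N (0 : Int)))) :=
    goodM_foldl ps f _ (fun x fila => List.length_modify _ _ _) _ hza hfN
  -- entrywise equality
  apply List.ext_getElem (by rw [hAg.1]; simp only [List.length_map]; exact hN)
  intro r h1 h2
  apply List.ext_getElem (by
    rw [hAg.2 _ (List.getElem_mem h1)]; simp only [List.getElem_map, List.length_map]; exact hN)
  intro c hc1 hc2
  have hrN : r < N := hAg.1 ▸ h1
  have hcN : c < N := (hAg.2 _ (List.getElem_mem h1)) ▸ hc1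
  have eA : ((ps.foldl (fun m p => m.modify (f p) (fun fila => fila.modify (g p) (· + 1)))
      (List.replicate N (List.replicate N (0 : Int)))).getD r []).getD c 0
      = (ps.foldl (fun m p => m.modify (f p) (fun fila => fila.modify (g p) (· + 1)))
      (List.replicate N (List.replicate N (0 : Int))))[r][c] := by
    rw [List.getD_eq_getElem _ _ h1]
    exact List.getD_eq_getElem _ _ hc1
  rw [← eA, A_fold_entry f g ps _ hza hfN hgN r c]
  have hza0 : ((List.replicate N (List.replicate N (0 : Int))).getD r []).getD c 0 = 0 := by
    rw [List.getD_eq_getElem?_getD]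
    simp [hrN, hcN]
  rw [hza0, zero_add]
  -- B's entry
  have eB : (alf.map (fun a => alf.map (fun b => ((ps.count (a, b) : Nat) : Int))))[r][c]'(by
        simpa using hc2)
      = ((ps.count (alf[r]'hrN, alf[c]'hcN) : Nat) : Int) := by
    simp
  rw [eB]
  have hcp : ps.countP (fun p => f p == r && g p == c) = ps.count (alf[r]'hrN, alf[c]'hcN) := by
    rw [List.count_eq_countP]
    apply List.countP_congr
    intro p hp
    have hp1 := hmalf _ (hmem p hp).1
    have hp2 := hmalf _ (hmem p hp).2
    simp only [hf, hg, Bool.and_eq_true, beq_iff_eq]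
    constructor
    · rintro ⟨e1, e2⟩
      exact Prod.ext ((idxOf_eq_iff hndalf hp1 hrN).mp e1) ((idxOf_eq_iff hndalf hp2 hcN).mp e2)
    · intro e
      rw [e]
      exact ⟨hndalf.idxOf_getElem r hrN, hndalf.idxOf_getElem c hcN⟩
  rw [hcp]

-- ===== VERDICT (by name: the statement is the Claim_ definition above) =====
theorem genMatrizOcurrencias_spec : Claim_equal_genMatrizOcurrencias := by
  intro cadena _
  unfold Spec_genMatrizOcurrencias
  exact main_eq cadena
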